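-- pv_equiv track=rewrite | github.com/isaacrc/Attn_to_Attn_fMRI | code2/analysis/mvpa/activations/roi_bpress_2023-6-1.py | find_cond_index
-- ===== SOURCE A (Python) =====
-- def find_cond_index(sub_ses_labels):
--     """
--     For the array of ordered run names (i.e.'Re', 'SM',) find the two indexes per condition
--     """
--     lab_inx = []
--
--     a = []
--     b = []
--     c = []
--     d = []
--     e = []
--
--     for i in enumerate(sub_ses_labels):
--         if i[1] == "SM":
--             # append the index according to where it appeared in the array
--             a.append(i[0])
--         if i[1] == "SC":
--             b.append(i[0])
--         if i[1] == "OM":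
--             c.append(i[0])
--         if i[1] == "OC":
--             d.append(i[0])
--
--     # Create a dictionary where each key contains the appropriate indexes
--     lab_indic = {
--         'SM' : a,
--         'SC' : b,
--         'OM' : c,
--         'OC' : d,
--         'RE' : [0,9]
--     }
--     return lab_indic
-- ===== SOURCE B (Python) =====
-- def find_cond_index(sub_ses_labels):
--     return {
--         'SM': [i for i, x in enumerate(sub_ses_labels) if x == 'SM'],
--         'SC': [i for i, x in enumerate(sub_ses_labels) if x == 'SC'],
--         'OM': [i for i, x in enumerate(sub_ses_labels) if x == 'OM'],
--         'OC': [i for i, x in enumerate(sub_ses_labels) if x == 'OC'],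
--         'RE': [0, 9],
--     }
-- ===== Notes on version B (the rewrite author's own statement) =====
-- stated objective: idiomatic
-- what changed: Replaces the single dispatch loop with four mutable accumulators by four independent enumerate-based list comprehensions, one per condition, feeding a dict literal directly.
import Mathlib
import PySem

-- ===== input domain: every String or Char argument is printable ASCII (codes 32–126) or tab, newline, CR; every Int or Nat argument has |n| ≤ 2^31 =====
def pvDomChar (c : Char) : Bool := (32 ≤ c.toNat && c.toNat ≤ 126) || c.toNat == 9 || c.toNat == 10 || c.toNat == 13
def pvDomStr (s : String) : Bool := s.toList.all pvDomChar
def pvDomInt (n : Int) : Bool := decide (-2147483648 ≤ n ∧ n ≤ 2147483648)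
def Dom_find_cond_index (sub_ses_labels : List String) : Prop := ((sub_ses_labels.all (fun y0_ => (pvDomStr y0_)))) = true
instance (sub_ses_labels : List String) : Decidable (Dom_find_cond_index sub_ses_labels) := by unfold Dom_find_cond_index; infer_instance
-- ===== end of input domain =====

-- B replaces A's single dispatch loop over four mutable accumulators by four independent
-- enumerate-based comprehensions feeding a dict literal (idiomatic; same cost).


-- ===== PORT A =====
-- One pass over enumerate(sub_ses_labels); four accumulators appended to by the
-- four independent 'if' branches, then the dict literal (A's unused lab_inx/e omitted).
def find_cond_index (sub_ses_labels : List String) : List (String × List Int) :=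
  let st := (PySem.List.enumerate sub_ses_labels).foldl
    (fun (s : List Int × List Int × List Int × List Int) i =>
      let s := if i.2 == "SM" then (s.1 ++ [i.1], s.2.1, s.2.2.1, s.2.2.2) else s
      let s := if i.2 == "SC" then (s.1, s.2.1 ++ [i.1], s.2.2.1, s.2.2.2) else s
      let s := if i.2 == "OM" then (s.1, s.2.1, s.2.2.1 ++ [i.1], s.2.2.2) else s
      let s := if i.2 == "OC" then (s.1, s.2.1, s.2.2.1, s.2.2.2 ++ [i.1]) else s
      s) ([], [], [], [])
  [("SM", st.1), ("SC", st.2.1), ("OM", st.2.2.1), ("OC", st.2.2.2), ("RE", [0, 9])]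

-- ===== PORT B =====
-- Each comprehension [i for i, x in enumerate(xs) if x == L] as filter-then-map over enumerate.
def pvCompIdx (sub_ses_labels : List String) (lab : String) : List Int :=
  ((PySem.List.enumerate sub_ses_labels).filter (fun p => p.2 == lab)).map (fun p => p.1)

def find_cond_index_alt (sub_ses_labels : List String) : List (String × List Int) :=
  [("SM", pvCompIdx sub_ses_labels "SM"),
   ("SC", pvCompIdx sub_ses_labels "SC"),
   ("OM", pvCompIdx sub_ses_labels "OM"),
   ("OC", pvCompIdx sub_ses_labels "OC"),
   ("RE", [0, 9])]

-- ===== PRECONDITION & SPEC =====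
def Spec_find_cond_index (sub_ses_labels : List String) (out : List (String × List Int)) : Prop := out = find_cond_index_alt sub_ses_labels
instance (sub_ses_labels : List String) (out : List (String × List Int)) : Decidable (Spec_find_cond_index sub_ses_labels out) := by unfold Spec_find_cond_index; infer_instance

-- ===== CLAIM (what is proved, stated in full; the proofs are below) =====
def Claim_equal_find_cond_index : Prop := ∀ (sub_ses_labels : List String), Dom_find_cond_index sub_ses_labels → Spec_find_cond_index sub_ses_labels (find_cond_index sub_ses_labels)

-- ===== LEMMAS AND PROOFS =====
-- Loop invariant: the fold appends each label's filtered indices to the accumulators.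
theorem fold_invariant (l : List (Int × String)) (a b c d : List Int) :
    l.foldl
      (fun (s : List Int × List Int × List Int × List Int) i =>
        let s := if i.2 == "SM" then (s.1 ++ [i.1], s.2.1, s.2.2.1, s.2.2.2) else s
        let s := if i.2 == "SC" then (s.1, s.2.1 ++ [i.1], s.2.2.1, s.2.2.2) else s
        let s := if i.2 == "OM" then (s.1, s.2.1, s.2.2.1 ++ [i.1], s.2.2.2) else s
        let s := if i.2 == "OC" then (s.1, s.2.1, s.2.2.1, s.2.2.2 ++ [i.1]) else s
        s) (a, b, c, d)
    = (a ++ ((l.filter (fun p => p.2 == "SM")).map (fun p => p.1)),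
       b ++ ((l.filter (fun p => p.2 == "SC")).map (fun p => p.1)),
       c ++ ((l.filter (fun p => p.2 == "OM")).map (fun p => p.1)),
       d ++ ((l.filter (fun p => p.2 == "OC")).map (fun p => p.1))) := by
  induction l generalizing a b c d with
  | nil => simp
  | cons p l ih =>
    simp only [List.foldl_cons, List.filter_cons]
    split_ifs <;> simp_all [List.append_assoc]

-- ===== VERDICT (by name: the statement is the Claim_ definition above) =====
theorem find_cond_index_spec : Claim_equal_find_cond_index := by
  intro xs _
  show find_cond_index xs = find_cond_index_alt xs
  unfold find_cond_index find_cond_index_alt pvCompIdx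
  rw [fold_invariant]
  simp
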